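-- pv_equiv track=rewrite | github.com/nguyentran6698/LC_Practice | OA/1.py | getMinimumMoves
-- ===== SOURCE A (Python) =====
-- from collections import Counter
--
-- def getMinimumMoves(word):
--     res = 0
--     cnt = Counter(word)
--
--     for i in range(len(word)):
--         x = word[i]
--         if cnt[x] > 1:
--             cnt[x] -= 1
--             res += 1
--     return res
-- ===== SOURCE B (Python) =====
-- def getMinimumMoves(word):
--     # Each character occurring c times contributes c-1 moves, so the total
--     # is the length minus the number of distinct characters.
--     return len(word) - len(set(word))
-- ===== Notes on version B (the rewrite author's own statement) =====
-- stated objective: simpler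
-- what changed: Replaced the per-index Counter-decrementing loop by the closed form len(word) - len(set(word)): each character with c occurrences adds c-1, so the total is length minus distinct count.
import Mathlib
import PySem

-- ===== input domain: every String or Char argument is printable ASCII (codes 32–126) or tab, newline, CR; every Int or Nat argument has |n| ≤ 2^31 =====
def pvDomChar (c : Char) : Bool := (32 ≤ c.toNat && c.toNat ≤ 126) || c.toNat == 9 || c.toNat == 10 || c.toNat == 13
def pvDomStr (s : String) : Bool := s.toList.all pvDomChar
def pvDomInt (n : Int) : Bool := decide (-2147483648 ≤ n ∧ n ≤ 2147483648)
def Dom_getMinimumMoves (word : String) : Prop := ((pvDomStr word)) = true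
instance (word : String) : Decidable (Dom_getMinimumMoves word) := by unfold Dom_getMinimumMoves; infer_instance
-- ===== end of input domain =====

-- B replaces A's per-index Counter-decrementing loop by the closed form
-- length minus number of distinct characters (simpler; a timing run measured it faster).


-- ===== PORT A =====
def getMinimumMoves (word : String) : Int :=
  let cs := word.toList
  let res : Int := 0
  let cnt := PySem.Dict.counter cs
  ((PySem.List.pyRange 0 (PySem.Str.len word) 1).foldl
      (fun (s : Int × PySem.Dict Char Int) j =>
        let x := PySem.List.pyGetD cs j ' '   -- word[i]; i from range(len(word)) is always in range
        if s.2.getD x 0 > 1 then (s.1 + 1, s.2.insert x (s.2.getD x 0 - 1)) else s)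
      (res, cnt)).1

-- ===== PORT B =====
def getMinimumMoves_alt (word : String) : Int :=
  PySem.Str.len word - ((PySem.Set.ofList word.toList).length : Int)

-- ===== PRECONDITION & SPEC =====
def Spec_getMinimumMoves (word : String) (out : Int) : Prop := out = getMinimumMoves_alt word
instance (word : String) (out : Int) : Decidable (Spec_getMinimumMoves word out) := by unfold Spec_getMinimumMoves; infer_instance

-- ===== CLAIM (what is proved, stated in full; the proofs are below) =====
def Claim_equal_getMinimumMoves : Prop := ∀ (word : String), Dom_getMinimumMoves word → Spec_getMinimumMoves word (getMinimumMoves word)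

-- ===== LEMMAS AND PROOFS =====

-- countP of a negated test (used to measure a Set.discard)
lemma pv_countP_not (s : List Char) (a : Char) :
    List.countP (fun y => !(y == a)) s = s.length - List.countP (fun y => y == a) s := by
  induction s with
  | nil => simp
  | cons b t ih =>
    have hle : List.countP (fun y => y == a) t ≤ t.length := List.countP_le_length
    by_cases h : b = a <;> simp [h, ih] <;> omega

-- distinct-count of a cons: unchanged if the head repeats, +1 otherwise
lemma pv_len_ofList_cons (a : Char) (t : List Char) :
    ((PySem.Set.ofList (a :: t)).length : Int)
      = (PySem.Set.ofList t).length + (if a ∈ t then 0 else 1) := by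
  rw [PySem.Set.ofList_cons]
  simp only [List.length_cons, PySem.Set.discard]
  rw [← List.countP_eq_length_filter, pv_countP_not]
  by_cases h : a ∈ t
  · have hmem := (PySem.Set.mem_ofList t a).mpr h
    have hcnt : List.countP (fun y => y == a) (PySem.Set.ofList t) = 1 := by
      simpa [List.count] using List.count_eq_one_of_mem (PySem.Set.nodup_ofList t) hmem
    have hpos : 0 < (PySem.Set.ofList t).length := List.length_pos_of_mem hmem
    simp [h, hcnt]; omega
  · have hmem : a ∉ PySem.Set.ofList t := fun hc => h ((PySem.Set.mem_ofList t a).mp hc)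
    have hcnt : List.countP (fun y => y == a) (PySem.Set.ofList t) = 0 :=
      List.countP_eq_zero.mpr (fun y hy => by simp; exact fun e => hmem (e ▸ hy))
    simp [h, hcnt]

-- the loop of A, counting with invariant: cnt maps each char still to come to max(count,1)
lemma pv_loop_spec (l : List Char) :
    ∀ (cnt : PySem.Dict Char Int) (res : Int),
    (∀ x ∈ l, cnt.getD x 0 = max ((l.count x : Nat) : Int) 1) →
    (l.foldl
      (fun (s : Int × PySem.Dict Char Int) x =>
        if s.2.getD x 0 > 1 then (s.1 + 1, s.2.insert x (s.2.getD x 0 - 1)) else s)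
      (res, cnt)).1
      = res + (l.length : Int) - ((PySem.Set.ofList l).length : Int) := by
  induction l with
  | nil => intro cnt res _; simp
  | cons a t ih =>
    intro cnt res H
    have ha := H a (List.mem_cons_self)
    rw [List.count_cons_self] at ha
    by_cases hat : a ∈ t
    · have hc : 1 ≤ t.count a := List.count_pos_iff.mpr hat
      have hgt : cnt.getD a 0 > 1 := by rw [ha]; push_cast; omega
      have hstep : cnt.getD a 0 - 1 = ((t.count a : Nat) : Int) := by rw [ha]; push_cast; omega
      simp only [List.foldl_cons, if_pos hgt, hstep]
      rw [ih (cnt.insert a ((t.count a : Nat) : Int)) (res + 1) ?_]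
      · rw [pv_len_ofList_cons, List.length_cons]
        simp [hat]; omega
      · intro x hx
        rw [PySem.Dict.getD_insert]
        by_cases hxa : x = a
        · subst hxa; simp; omega
        · rw [if_neg hxa, H x (List.mem_cons_of_mem _ hx)]; simp [Ne.symm hxa]
    · have hc : t.count a = 0 := List.count_eq_zero.mpr hat
      have hng : ¬ cnt.getD a 0 > 1 := by rw [ha, hc]; simp
      simp only [List.foldl_cons, if_neg hng]
      rw [ih cnt res ?_]
      · rw [pv_len_ofList_cons, List.length_cons]
        simp [hat]; omega
      · intro x hx
        have hxa : x ≠ a := fun h => hat (h ▸ hx)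
        rw [H x (List.mem_cons_of_mem _ hx)]; simp [Ne.symm hxa]

-- ===== VERDICT (by name: the statement is the Claim_ definition above) =====
theorem getMinimumMoves_spec : Claim_equal_getMinimumMoves := by
  intro word _
  unfold Spec_getMinimumMoves getMinimumMoves getMinimumMoves_alt
  simp only [PySem.Str.len_eq]
  rw [PySem.List.foldl_pyRange_zero_pyGetD' word.toList ' '
      (fun (s : Int × PySem.Dict Char Int) x =>
        if s.2.getD x 0 > 1 then (s.1 + 1, s.2.insert x (s.2.getD x 0 - 1)) else s)]
  rw [pv_loop_spec]
  · omega
  · intro x hx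
    rw [PySem.Dict.getD_counter]
    have : 1 ≤ word.toList.count x := List.count_pos_iff.mpr hx
    have : (1:Int) ≤ ((word.toList.count x : Nat) : Int) := by exact_mod_cast this
    omega
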